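-- pv_equiv track=rewrite | github.com/SeonjaeHyeon/Study-21-1-codingTest | dongjun/code_1week/2_2798.py | check
-- ===== SOURCE A (Python) =====
-- def check(arr, cache, M):
--     for i in range(len(arr)):
--         for j in range(i, len(arr)):
--             for k in range(j, len(arr)):
--                 if(i == j or j == k or k == i):
--                     continue
--                 temp = arr[i]+arr[j]+arr[k]
--                 if temp <= M:
--                     cache.append(temp)
--     return max(cache)
-- ===== SOURCE B (Python) =====
-- def check(arr, cache, M):
--     # Sort once, then for each first card use a two-pointer scan for the best
--     # pair completing a triple with sum <= M; fold the cache in at the end.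
--     # NOTE: unlike the original, this does not append the candidate sums to
--     # `cache`; the equivalence is about the return value only.
--     s = sorted(arr)
--     best = None
--     for i in range(len(s)):
--         lo, hi = i + 1, len(s) - 1
--         while lo < hi:
--             t = s[i] + s[lo] + s[hi]
--             if t <= M:
--                 if best is None or t > best:
--                     best = t
--                 lo += 1
--             else:
--                 hi -= 1
--     for v in cache:
--         if best is None or v > best:
--             best = v
--     return best
-- ===== Notes on version B (the rewrite author's own statement) =====
-- stated objective: faster
-- what changed: Replaces the O(n^3) scan over all index triples by sort + fix-first-card + two-pointer scan, folding the cache in with a running max instead of appending candidates and calling max().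
import Mathlib
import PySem

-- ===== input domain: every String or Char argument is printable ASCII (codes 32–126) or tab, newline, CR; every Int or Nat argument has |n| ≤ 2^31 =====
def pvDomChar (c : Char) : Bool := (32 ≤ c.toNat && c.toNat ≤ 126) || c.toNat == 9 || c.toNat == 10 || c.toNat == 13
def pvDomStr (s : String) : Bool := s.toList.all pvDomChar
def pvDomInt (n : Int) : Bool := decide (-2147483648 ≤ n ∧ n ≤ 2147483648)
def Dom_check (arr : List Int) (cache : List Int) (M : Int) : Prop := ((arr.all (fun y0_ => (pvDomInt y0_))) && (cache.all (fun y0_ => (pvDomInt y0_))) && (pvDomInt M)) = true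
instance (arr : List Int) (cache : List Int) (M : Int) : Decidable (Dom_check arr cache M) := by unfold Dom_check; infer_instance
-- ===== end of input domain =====

-- B replaces A's cubic scan over all index triples by sort + fix-first-card +
-- two-pointer scan (objective: faster). A appends the candidate sums to `cache`
-- in place; B does not, so the equivalence proved here is about the RETURN
-- value only.

-- ===== PORT A =====
def check (arr : List Int) (cache : List Int) (M : Int) : Int :=
  let n := PySem.List.len arr
  let cache' :=
    (PySem.List.pyRange 0 n 1).foldl (fun c1 i =>
      (PySem.List.pyRange i n 1).foldl (fun c2 j =>
        (PySem.List.pyRange j n 1).foldl (fun c3 k =>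
          if i = j ∨ j = k ∨ k = i then c3
          else
            let temp := PySem.List.pyGetD arr i 0 + PySem.List.pyGetD arr j 0 + PySem.List.pyGetD arr k 0
            if temp ≤ M then c3 ++ [temp] else c3) c2) c1) cache
  match PySem.List.max? cache' (fun y => y) with
  | some v => v
  | none => 0          -- Python raises ValueError here; excluded by Pre_check

-- ===== PORT B =====
-- the `while lo < hi` loop of Source B
def twoPtr (s : List Int) (M si lo hi : Int) (best : Option Int) : Option Int :=
  if h : lo < hi then
    let t := si + PySem.List.pyGetD s lo 0 + PySem.List.pyGetD s hi 0
    if t ≤ M then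
      let best' := match best with
        | none => some t
        | some b => if t > b then some t else some b
      twoPtr s M si (lo + 1) hi best'
    else
      twoPtr s M si lo (hi - 1) best
  else best
termination_by (hi - lo).toNat
decreasing_by all_goals omega

def check_alt (arr : List Int) (cache : List Int) (M : Int) : Int :=
  let s := PySem.List.sorted arr (fun x => x) false
  let n := PySem.List.len s
  let best :=
    (PySem.List.pyRange 0 n 1).foldl (fun best i =>
      twoPtr s M (PySem.List.pyGetD s i 0) (i + 1) (n - 1) best) none
  let best := cache.foldl (fun best v =>
      match best with
      | none => some v
      | some b => if v > b then some v else some b) best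
  match best with
  | some b => b
  | none => 0          -- Python B returns None here; excluded by Pre_check

-- ===== PRECONDITION & SPEC =====
-- Pre_ excludes exactly the inputs where Python A raises ValueError (max of an
-- empty list): cache empty and no three distinct cards summing to ≤ M.
def Pre_check (arr : List Int) (cache : List Int) (M : Int) : Prop :=
  cache ≠ [] ∨ ∃ t ∈ arr.sublistsLen 3, t.sum ≤ M
instance (arr : List Int) (cache : List Int) (M : Int) : Decidable (Pre_check arr cache M) := by unfold Pre_check; infer_instance
def pvWitness_check : List Int × List Int × Int := ([1, 2, 3], [0], 10)

def Spec_check (arr : List Int) (cache : List Int) (M : Int) (out : Int) : Prop := out = check_alt arr cache M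
instance (arr : List Int) (cache : List Int) (M : Int) (out : Int) : Decidable (Spec_check arr cache M out) := by unfold Spec_check; infer_instance

-- ===== CLAIM (what is proved, stated in full; the proofs are below) =====
def Claim_equal_check : Prop := ∀ (arr : List Int) (cache : List Int) (M : Int), Dom_check arr cache M → Pre_check arr cache M → Spec_check arr cache M (check arr cache M)

-- ===== LEMMAS AND PROOFS =====

-- `o` is the maximum of the set `S` (none ↔ S empty)
def IsMaxO (S : Int → Prop) : Option Int → Prop
  | none => ∀ v, ¬ S v
  | some r => S r ∧ ∀ v, S v → v ≤ r

theorem isMaxO_unique {S : Int → Prop} {o₁ o₂ : Option Int}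
    (h₁ : IsMaxO S o₁) (h₂ : IsMaxO S o₂) : o₁ = o₂ := by
  cases o₁ with
  | none => cases o₂ with
    | none => rfl
    | some r => exact absurd h₂.1 (h₁ r)
  | some r => cases o₂ with
    | none => exact absurd h₁.1 (h₂ r)
    | some r' => exact congrArg some (le_antisymm (h₂.2 r h₁.1) (h₁.2 r' h₂.1))

theorem isMaxO_congr {S S' : Int → Prop} {o : Option Int}
    (h1 : ∀ v, S' v → S v) (h2 : ∀ v, S v → ∃ w, S' w ∧ v ≤ w)
    (h : IsMaxO S' o) : IsMaxO S o := by
  cases o with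
  | none =>
    intro v hv
    obtain ⟨w, hw, _⟩ := h2 v hv
    exact h w hw
  | some r =>
    refine ⟨h1 r h.1, fun v hv => ?_⟩
    obtain ⟨w, hw, hvw⟩ := h2 v hv
    exact le_trans hvw (h.2 w hw)

theorem isMaxO_iff {S S' : Int → Prop} {o : Option Int}
    (hiff : ∀ v, S v ↔ S' v) (h : IsMaxO S' o) : IsMaxO S o :=
  isMaxO_congr (fun v hv => (hiff v).2 hv) (fun v hv => ⟨v, (hiff v).1 hv, le_refl v⟩) h

-- v is the sum of three distinct cards of l
def TripN (l : List Int) (v : Int) : Prop :=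
  ∃ t : List Int, t.Subperm l ∧ t.length = 3 ∧ t.sum = v

theorem tripN_perm {l l' : List Int} (h : l.Perm l') (v : Int) :
    TripN l v ↔ TripN l' v := by
  constructor <;> rintro ⟨t, hs, h3, hv⟩
  · exact ⟨t, hs.trans h.subperm, h3, hv⟩
  · exact ⟨t, hs.trans h.symm.subperm, h3, hv⟩

theorem tripN_iff_idx (l : List Int) (v : Int) :
    TripN l v ↔ ∃ i j k : Nat, i < j ∧ j < k ∧ k < l.length ∧
      l.getD i 0 + l.getD j 0 + l.getD k 0 = v := by
  constructor
  · rintro ⟨t, ⟨t', hperm, hsub⟩, h3, hv⟩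
    obtain ⟨is, heq, hpw⟩ := List.sublist_eq_map_getElem hsub
    have hlen' : t'.length = 3 := hperm.length_eq.trans h3
    have hislen : is.length = 3 := by
      have := congrArg List.length heq
      simpa [hlen'] using this.symm
    match is, hislen with
    | [a, b, c], _ =>
      have hpw' : ((a : Fin l.length) < b ∧ a < c) ∧ b < c := by simpa using hpw
      refine ⟨a, b, c, Fin.lt_def.mp hpw'.1.1, Fin.lt_def.mp hpw'.2, c.isLt, ?_⟩
      have hveq : l[(a : Nat)] + l[(b : Nat)] + l[(c : Nat)] = v := by
        have hs : t'.sum = v := hperm.sum_eq.trans hv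
        rw [heq] at hs
        simpa [add_assoc, Fin.getElem_fin] using hs
      rw [List.getD_eq_getElem l 0 a.isLt, List.getD_eq_getElem l 0 b.isLt,
        List.getD_eq_getElem l 0 c.isLt]
      exact hveq
  · rintro ⟨i, j, k, hij, hjk, hk, hv⟩
    have hi : i < l.length := by omega
    have hj : j < l.length := by omega
    refine ⟨[l[i], l[j], l[k]], ?_, rfl, ?_⟩
    · refine (List.map_getElem_sublist (l := l)
        (is := [⟨i, hi⟩, ⟨j, hj⟩, ⟨k, hk⟩]) ?_).subperm
      simp [hij, hjk, Nat.lt_trans hij hjk]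
    · rw [List.getD_eq_getElem l 0 hi, List.getD_eq_getElem l 0 hj,
        List.getD_eq_getElem l 0 hk] at hv
      simpa [add_assoc] using hv

-- ===== A-side characterisation =====

-- what the innermost loop body of A appends for the index triple (i, j, k)
def gTrip (arr : List Int) (M : Int) (i j k : Int) : List Int :=
  if i = j ∨ j = k ∨ k = i then []
  else if PySem.List.pyGetD arr i 0 + PySem.List.pyGetD arr j 0 + PySem.List.pyGetD arr k 0 ≤ M
    then [PySem.List.pyGetD arr i 0 + PySem.List.pyGetD arr j 0 + PySem.List.pyGetD arr k 0]
    else []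

theorem mem_gTrip (arr : List Int) (M : Int) (i j k v : Int) :
    v ∈ gTrip arr M i j k ↔ ¬(i = j ∨ j = k ∨ k = i) ∧
      PySem.List.pyGetD arr i 0 + PySem.List.pyGetD arr j 0 + PySem.List.pyGetD arr k 0 ≤ M ∧
      v = PySem.List.pyGetD arr i 0 + PySem.List.pyGetD arr j 0 + PySem.List.pyGetD arr k 0 := by
  unfold gTrip
  split_ifs with hd hm
  · simp [hd]
  · simp [hd, hm]
  · simp [hd, hm]

theorem a_cache'_mem (arr cache : List Int) (M : Int) (v : Int) :
    v ∈ (PySem.List.pyRange 0 (PySem.List.len arr) 1).foldl (fun c1 i =>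
      (PySem.List.pyRange i (PySem.List.len arr) 1).foldl (fun c2 j =>
        (PySem.List.pyRange j (PySem.List.len arr) 1).foldl (fun c3 k =>
          if i = j ∨ j = k ∨ k = i then c3
          else
            let temp := PySem.List.pyGetD arr i 0 + PySem.List.pyGetD arr j 0 + PySem.List.pyGetD arr k 0
            if temp ≤ M then c3 ++ [temp] else c3) c2) c1) cache
    ↔ v ∈ cache ∨ (TripN arr v ∧ v ≤ M) := by
  have h3 : ∀ (i j : Int) (c2 : List Int),
      (PySem.List.pyRange j (PySem.List.len arr) 1).foldl (fun c3 k =>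
          if i = j ∨ j = k ∨ k = i then c3
          else
            let temp := PySem.List.pyGetD arr i 0 + PySem.List.pyGetD arr j 0 + PySem.List.pyGetD arr k 0
            if temp ≤ M then c3 ++ [temp] else c3) c2
      = c2 ++ (PySem.List.pyRange j (PySem.List.len arr) 1).flatMap (gTrip arr M i j) := by
    intro i j c2
    rw [PySem.List.foldl_congr_mem _ _ (fun c3 k => c3 ++ gTrip arr M i j k) c2
      (by
        intro acc k hk
        dsimp only
        unfold gTrip
        split_ifs <;> simp)]
    exact PySem.List.foldl_append_eq_flatMap _ _ _
  have h2 : ∀ (i : Int) (c1 : List Int),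
      (PySem.List.pyRange i (PySem.List.len arr) 1).foldl (fun c2 j =>
        (PySem.List.pyRange j (PySem.List.len arr) 1).foldl (fun c3 k =>
          if i = j ∨ j = k ∨ k = i then c3
          else
            let temp := PySem.List.pyGetD arr i 0 + PySem.List.pyGetD arr j 0 + PySem.List.pyGetD arr k 0
            if temp ≤ M then c3 ++ [temp] else c3) c2) c1
      = c1 ++ (PySem.List.pyRange i (PySem.List.len arr) 1).flatMap (fun j =>
          (PySem.List.pyRange j (PySem.List.len arr) 1).flatMap (gTrip arr M i j)) := by
    intro i c1
    rw [PySem.List.foldl_congr_mem _ _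
      (fun c2 j => c2 ++ (PySem.List.pyRange j (PySem.List.len arr) 1).flatMap (gTrip arr M i j)) c1
      (fun acc j _ => h3 i j acc)]
    exact PySem.List.foldl_append_eq_flatMap _ _ _
  rw [PySem.List.foldl_congr_mem _ _
    (fun c1 i => c1 ++ (PySem.List.pyRange i (PySem.List.len arr) 1).flatMap (fun j =>
        (PySem.List.pyRange j (PySem.List.len arr) 1).flatMap (gTrip arr M i j))) cache
    (fun acc i _ => h2 i acc),
    PySem.List.foldl_append_eq_flatMap]
  simp only [List.mem_append, List.mem_flatMap, PySem.List.mem_pyRange_one, PySem.List.len_eq]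
  constructor
  · rintro (hv | ⟨i, ⟨hi0, hin⟩, j, ⟨hij, hjn⟩, k, ⟨hjk, hkn⟩, hg⟩)
    · exact Or.inl hv
    · obtain ⟨hd, hm, rfl⟩ := (mem_gTrip arr M i j k v).mp hg
      push Not at hd
      right
      have e1 : PySem.List.pyGetD arr i 0 = arr.getD i.toNat 0 := by
        rw [show i = ((i.toNat : Nat) : Int) by omega, PySem.List.pyGetD_natCast, Int.toNat_natCast]
      have e2 : PySem.List.pyGetD arr j 0 = arr.getD j.toNat 0 := by
        rw [show j = ((j.toNat : Nat) : Int) by omega, PySem.List.pyGetD_natCast, Int.toNat_natCast]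
      have e3 : PySem.List.pyGetD arr k 0 = arr.getD k.toNat 0 := by
        rw [show k = ((k.toNat : Nat) : Int) by omega, PySem.List.pyGetD_natCast, Int.toNat_natCast]
      refine ⟨(tripN_iff_idx arr _).mpr ⟨i.toNat, j.toNat, k.toNat, by omega, by omega, by omega, ?_⟩, hm⟩
      rw [e1, e2, e3]
  · rintro (hv | ⟨htr, hvM⟩)
    · exact Or.inl hv
    · obtain ⟨i, j, k, hij, hjk, hk, hsum⟩ := (tripN_iff_idx arr v).mp htr
      right
      refine ⟨(i : Int), ⟨by omega, by omega⟩, (j : Int), ⟨by omega, by omega⟩,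
        (k : Int), ⟨by omega, by omega⟩, ?_⟩
      refine (mem_gTrip arr M (i : Int) (j : Int) (k : Int) v).mpr ⟨by push Not; omega, ?_, ?_⟩
      · simp only [PySem.List.pyGetD_natCast]
        omega
      · simp only [PySem.List.pyGetD_natCast]
        omega

-- ===== B-side characterisation =====

-- pairs completing a triple within the window [lo, hi]
def WPair (s : List Int) (M si lo hi : Int) (v : Int) : Prop :=
  ∃ a b : Int, lo ≤ a ∧ a < b ∧ b ≤ hi ∧
    si + PySem.List.pyGetD s a 0 + PySem.List.pyGetD s b 0 = v ∧ v ≤ M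

theorem tstep_congr (s : List Int) (M si lo hi : Int) (h : lo < hi)
    (hmono : ∀ a b : Int, 0 ≤ a → a ≤ b → b < (s.length : Int) →
      PySem.List.pyGetD s a 0 ≤ PySem.List.pyGetD s b 0)
    (h0 : 0 ≤ lo) (h1 : hi < (s.length : Int))
    (ht : si + PySem.List.pyGetD s lo 0 + PySem.List.pyGetD s hi 0 ≤ M)
    (S : Int → Prop) (o : Option Int)
    (ho : IsMaxO (fun v => (S v ∨ v = si + PySem.List.pyGetD s lo 0 + PySem.List.pyGetD s hi 0) ∨ WPair s M si (lo + 1) hi v) o) :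
    IsMaxO (fun v => S v ∨ WPair s M si lo hi v) o := by
  refine isMaxO_congr ?_ ?_ ho
  · rintro v ((hv | rfl) | ⟨a, b, ha, hab, hbhi, hsum, hvM⟩)
    · exact Or.inl hv
    · exact Or.inr ⟨lo, hi, le_refl lo, h, le_refl hi, rfl, ht⟩
    · exact Or.inr ⟨a, b, by omega, hab, hbhi, hsum, hvM⟩
  · rintro v (hv | ⟨a, b, ha, hab, hbhi, hsum, hvM⟩)
    · exact ⟨v, Or.inl (Or.inl hv), le_refl v⟩
    · by_cases hla : lo + 1 ≤ a
      · exact ⟨v, Or.inr ⟨a, b, hla, hab, hbhi, hsum, hvM⟩, le_refl v⟩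
      · have haeq : a = lo := by omega
        subst haeq
        have hble : PySem.List.pyGetD s b 0 ≤ PySem.List.pyGetD s hi 0 :=
          hmono b hi (by omega) hbhi h1
        exact ⟨si + PySem.List.pyGetD s a 0 + PySem.List.pyGetD s hi 0,
          Or.inl (Or.inr rfl), by omega⟩

theorem twoPtr_spec (s : List Int) (M si : Int)
    (hmono : ∀ a b : Int, 0 ≤ a → a ≤ b → b < (s.length : Int) →
      PySem.List.pyGetD s a 0 ≤ PySem.List.pyGetD s b 0)
    (lo hi : Int) (h0 : 0 ≤ lo) (h1 : hi < (s.length : Int))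
    (best : Option Int) (S : Int → Prop) (hb : IsMaxO S best) :
    IsMaxO (fun v => S v ∨ WPair s M si lo hi v) (twoPtr s M si lo hi best) := by
  rw [twoPtr.eq_def]
  split
  · rename_i h
    dsimp only
    by_cases ht : si + PySem.List.pyGetD s lo 0 + PySem.List.pyGetD s hi 0 ≤ M
    · rw [if_pos ht]
      cases best with
      | none =>
        dsimp only
        refine tstep_congr s M si lo hi h hmono h0 h1 ht S _
          (twoPtr_spec s M si hmono (lo + 1) hi (by omega) h1 _ _ ?_)
        refine ⟨Or.inr rfl, fun v hv => ?_⟩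
        rcases hv with hv | hv
        · exact absurd hv (hb v)
        · omega
      | some b =>
        dsimp only
        by_cases hgt : si + PySem.List.pyGetD s lo 0 + PySem.List.pyGetD s hi 0 > b
        · rw [if_pos hgt]
          refine tstep_congr s M si lo hi h hmono h0 h1 ht S _
            (twoPtr_spec s M si hmono (lo + 1) hi (by omega) h1 _ _ ?_)
          refine ⟨Or.inr rfl, fun v hv => ?_⟩
          rcases hv with hv | hv
          · have := hb.2 v hv; omega
          · omega
        · rw [if_neg hgt]
          refine tstep_congr s M si lo hi h hmono h0 h1 ht S _
            (twoPtr_spec s M si hmono (lo + 1) hi (by omega) h1 _ _ ?_)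
          refine ⟨Or.inl hb.1, fun v hv => ?_⟩
          rcases hv with hv | hv
          · exact hb.2 v hv
          · omega
    · rw [if_neg ht]
      have hrec := twoPtr_spec s M si hmono lo (hi - 1) h0 (by omega) best S hb
      refine isMaxO_congr ?_ ?_ hrec
      · rintro v (hv | ⟨a, b, ha, hab, hbhi, hsum, hvM⟩)
        · exact Or.inl hv
        · exact Or.inr ⟨a, b, ha, hab, by omega, hsum, hvM⟩
      · rintro v (hv | ⟨a, b, ha, hab, hbhi, hsum, hvM⟩)
        · exact ⟨v, Or.inl hv, le_refl v⟩
        · by_cases hbh : b ≤ hi - 1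
          · exact ⟨v, Or.inr ⟨a, b, ha, hab, hbh, hsum, hvM⟩, le_refl v⟩
          · have hbeq : b = hi := by omega
            subst hbeq
            have hale : PySem.List.pyGetD s lo 0 ≤ PySem.List.pyGetD s a 0 :=
              hmono lo a h0 ha (by omega)
            exact absurd hvM (by omega)
  · rename_i h
    refine isMaxO_congr ?_ ?_ hb
    · exact fun v hv => Or.inl hv
    · rintro v (hv | ⟨a, b, ha, hab, hbhi, hsum, hvM⟩)
      · exact ⟨v, hv, le_refl v⟩
      · omega
termination_by (hi - lo).toNat
decreasing_by all_goals omega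

theorem outer_spec (s : List Int) (M : Int)
    (hmono : ∀ a b : Int, 0 ≤ a → a ≤ b → b < (s.length : Int) →
      PySem.List.pyGetD s a 0 ≤ PySem.List.pyGetD s b 0)
    (m : Int) (h0 : 0 ≤ m) (best : Option Int) (S : Int → Prop) (hb : IsMaxO S best) :
    IsMaxO (fun v => S v ∨ ∃ i : Int, m ≤ i ∧ WPair s M (PySem.List.pyGetD s i 0) (i + 1) ((s.length : Int) - 1) v)
      ((PySem.List.pyRange m (s.length : Int) 1).foldl (fun best i =>
        twoPtr s M (PySem.List.pyGetD s i 0) (i + 1) ((s.length : Int) - 1) best) best) := by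
  by_cases hm : (s.length : Int) ≤ m
  · rw [PySem.List.pyRange_one_eq_nil hm]
    refine isMaxO_congr ?_ ?_ hb
    · exact fun v hv => Or.inl hv
    · rintro v (hv | ⟨i, hi, a, b, ha, hab, hbhi, hsum, hvM⟩)
      · exact ⟨v, hv, le_refl v⟩
      · omega
  · rw [PySem.List.pyRange_one_cons (by omega), List.foldl_cons]
    have hstep := twoPtr_spec s M (PySem.List.pyGetD s m 0) hmono (m + 1)
      ((s.length : Int) - 1) (by omega) (by omega) best S hb
    have hrec := outer_spec s M hmono (m + 1) (by omega) _ _ hstep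
    refine isMaxO_iff (fun v => ?_) hrec
    constructor
    · rintro (hv | ⟨i, hi, hw⟩)
      · exact Or.inl (Or.inl hv)
      · by_cases him : m + 1 ≤ i
        · exact Or.inr ⟨i, him, hw⟩
        · have : i = m := by omega
          subst this
          exact Or.inl (Or.inr hw)
    · rintro ((hv | hw) | ⟨i, hi, hw⟩)
      · exact Or.inl hv
      · exact Or.inr ⟨m, le_refl m, hw⟩
      · exact Or.inr ⟨i, by omega, hw⟩
termination_by ((s.length : Int) - m).toNat
decreasing_by all_goals omega

theorem cache_fold_spec (l : List Int) :
    ∀ (best : Option Int) (S : Int → Prop), IsMaxO S best →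
    IsMaxO (fun v => S v ∨ v ∈ l)
      (l.foldl (fun best v =>
        match best with
        | none => some v
        | some b => if v > b then some v else some b) best) := by
  induction l with
  | nil =>
    intro best S hb
    refine isMaxO_iff (fun v => ?_) hb
    simp
  | cons x t ih =>
    intro best S hb
    rw [List.foldl_cons]
    have key : ∀ (b2 : Option Int), IsMaxO (fun v => S v ∨ v = x) b2 →
        IsMaxO (fun v => S v ∨ v ∈ x :: t)
          (t.foldl (fun best v =>
            match best with
            | none => some v
            | some b => if v > b then some v else some b) b2) := by
      intro b2 hb2
      refine isMaxO_iff (fun v => ?_) (ih b2 _ hb2)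
      constructor
      · rintro (hv | hv)
        · exact Or.inl (Or.inl hv)
        · rcases List.mem_cons.mp hv with hv | hv
          · exact Or.inl (Or.inr hv)
          · exact Or.inr hv
      · rintro ((hv | hv) | hv)
        · exact Or.inl hv
        · exact Or.inr (by simp [hv])
        · exact Or.inr (List.mem_cons_of_mem x hv)
    cases best with
    | none =>
      refine key (some x) ⟨Or.inr rfl, fun v hv => ?_⟩
      rcases hv with hv | hv
      · exact absurd hv (hb v)
      · omega
    | some b =>
      dsimp only
      by_cases hgt : x > b
      · rw [if_pos hgt]
        refine key (some x) ⟨Or.inr rfl, fun v hv => ?_⟩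
        rcases hv with hv | hv
        · have := hb.2 v hv; omega
        · omega
      · rw [if_neg hgt]
        refine key (some b) ⟨Or.inl hb.1, fun v hv => ?_⟩
        rcases hv with hv | hv
        · exact hb.2 v hv
        · omega

theorem b_triples_iff (arr : List Int) (M : Int) (v : Int) :
    (∃ i : Int, 0 ≤ i ∧ WPair (PySem.List.sorted arr (fun x => x) false) M
        (PySem.List.pyGetD (PySem.List.sorted arr (fun x => x) false) i 0) (i + 1)
        (((PySem.List.sorted arr (fun x => x) false).length : Int) - 1) v)
    ↔ (TripN arr v ∧ v ≤ M) := by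
  have hperm := PySem.List.sorted_perm arr (fun x => x) false
  have htri : TripN arr v ↔ TripN (PySem.List.sorted arr (fun x => x) false) v :=
    (tripN_perm hperm v).symm
  rw [htri, tripN_iff_idx]
  constructor
  · rintro ⟨i, hi0, a, b, ha, hab, hb, hsum, hvM⟩
    have e1 : PySem.List.pyGetD (PySem.List.sorted arr (fun x => x) false) i 0
        = (PySem.List.sorted arr (fun x => x) false).getD i.toNat 0 := by
      rw [show i = ((i.toNat : Nat) : Int) by omega, PySem.List.pyGetD_natCast, Int.toNat_natCast]
    have e2 : PySem.List.pyGetD (PySem.List.sorted arr (fun x => x) false) a 0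
        = (PySem.List.sorted arr (fun x => x) false).getD a.toNat 0 := by
      rw [show a = ((a.toNat : Nat) : Int) by omega, PySem.List.pyGetD_natCast, Int.toNat_natCast]
    have e3 : PySem.List.pyGetD (PySem.List.sorted arr (fun x => x) false) b 0
        = (PySem.List.sorted arr (fun x => x) false).getD b.toNat 0 := by
      rw [show b = ((b.toNat : Nat) : Int) by omega, PySem.List.pyGetD_natCast, Int.toNat_natCast]
    rw [e1, e2, e3] at hsum
    exact ⟨⟨i.toNat, a.toNat, b.toNat, by omega, by omega, by omega, hsum⟩, hvM⟩
  · rintro ⟨⟨i, j, k, hij, hjk, hk, hsum⟩, hvM⟩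
    refine ⟨(i : Int), by omega, (j : Int), (k : Int), by omega, by omega, by omega, ?_, hvM⟩
    simp only [PySem.List.pyGetD_natCast]
    exact hsum

theorem max?_isMaxO_of_mem_iff {l : List Int} {S : Int → Prop} (h : ∀ v, v ∈ l ↔ S v) :
    IsMaxO S (PySem.List.max? l (fun y => y)) := by
  cases hm : PySem.List.max? l (fun y => y) with
  | none =>
    have hnil := (PySem.List.max?_eq_none_iff l _).mp hm
    intro v hv
    have : v ∈ l := (h v).mpr hv
    simp [hnil] at this
  | some m =>
    refine ⟨(h m).mp (PySem.List.max?_mem hm), fun v hv => ?_⟩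
    simpa using PySem.List.max?_isMax hm v ((h v).mpr hv)

theorem check_eq_check_alt (arr cache : List Int) (M : Int) :
    check arr cache M = check_alt arr cache M := by
  simp only [check, check_alt, PySem.List.len_eq]
  have hmem := a_cache'_mem arr cache M
  simp only [PySem.List.len_eq] at hmem
  have hmono : ∀ a b : Int, 0 ≤ a → a ≤ b →
      b < ((PySem.List.sorted arr (fun x => x) false).length : Int) →
      PySem.List.pyGetD (PySem.List.sorted arr (fun x => x) false) a 0 ≤
        PySem.List.pyGetD (PySem.List.sorted arr (fun x => x) false) b 0 := by
    intro a b ha hab hb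
    rw [show a = ((a.toNat : Nat) : Int) by omega, show b = ((b.toNat : Nat) : Int) by omega,
      PySem.List.pyGetD_natCast, PySem.List.pyGetD_natCast,
      List.getD_eq_getElem _ 0 (by omega), List.getD_eq_getElem _ 0 (by omega)]
    exact PySem.List.sorted_id_getElem_mono arr (by omega) (by omega)
  have hnone : IsMaxO (fun _ => False) (none : Option Int) := fun _ h => h
  have hout := outer_spec (PySem.List.sorted arr (fun x => x) false) M hmono 0 (le_refl 0) none _ hnone
  have hcf := cache_fold_spec cache _ _ hout
  have hiff : ∀ v, (v ∈ cache ∨ (TripN arr v ∧ v ≤ M)) ↔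
      ((False ∨ ∃ i : Int, 0 ≤ i ∧ WPair (PySem.List.sorted arr (fun x => x) false) M
          (PySem.List.pyGetD (PySem.List.sorted arr (fun x => x) false) i 0) (i + 1)
          (((PySem.List.sorted arr (fun x => x) false).length : Int) - 1) v) ∨ v ∈ cache) := by
    intro v
    constructor
    · rintro (hv | hx)
      · exact Or.inr hv
      · exact Or.inl (Or.inr ((b_triples_iff arr M v).mpr hx))
    · rintro ((h | h) | hv)
      · exact absurd h not_false
      · exact Or.inr ((b_triples_iff arr M v).mp h)
      · exact Or.inl hv
  have hB := isMaxO_iff hiff hcf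
  have hA := max?_isMaxO_of_mem_iff hmem
  rw [isMaxO_unique hA hB]

-- ===== VERDICT (by name: the statement is the Claim_ definition above) =====
theorem check_spec : Claim_equal_check := by
  intro arr cache M _hdom _hpre
  exact check_eq_check_alt arr cache M
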